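-- pv_equiv track=rewrite | github.com/erlais/advent | 2019/24_1.py | bio
-- ===== SOURCE A (Python) =====
-- def bio(g):
--     n = 0
--     total = 0
--     for row in g:
--         for col in row:
--             if col == '#':
--                 total += 2**(n)
--             n += 1
--     return total
-- ===== SOURCE B (Python) =====
-- def bio(g):
--     bits = ''.join('1' if col == '#' else '0' for row in g for col in row)
--     if not bits:
--         return 0
--     return int(bits[::-1], 2)
-- ===== Notes on version B (the rewrite author's own statement) =====
-- stated objective: idiomatic
-- what changed: Replaces the explicit power-of-two accumulator loop with building a row-major bit string, reversing it, and parsing it as a base-2 integer (empty grid yields 0).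
import Mathlib
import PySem

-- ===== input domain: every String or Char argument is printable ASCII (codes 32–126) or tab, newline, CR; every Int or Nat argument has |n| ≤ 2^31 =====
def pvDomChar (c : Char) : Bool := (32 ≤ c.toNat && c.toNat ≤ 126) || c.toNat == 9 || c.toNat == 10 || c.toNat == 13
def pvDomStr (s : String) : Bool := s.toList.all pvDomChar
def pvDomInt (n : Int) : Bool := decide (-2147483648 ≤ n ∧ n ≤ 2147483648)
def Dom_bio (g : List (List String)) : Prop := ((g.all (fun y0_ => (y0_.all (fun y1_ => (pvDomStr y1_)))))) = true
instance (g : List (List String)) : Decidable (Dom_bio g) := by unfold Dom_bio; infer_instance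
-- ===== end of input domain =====

-- B builds the bit string and parses it base-2 instead of accumulating powers of two (idiomatic decomposition).
-- ===== PORT A =====
def bio (g : List (List String)) : Int :=
  (g.foldl (fun (st : Nat × Int) row =>
    row.foldl (fun (st : Nat × Int) col =>
      (st.1 + 1, if col = "#" then st.2 + 2 ^ st.1 else st.2)) st) (0, 0)).2

-- ===== PORT B =====
def bio_alt (g : List (List String)) : Int :=
  let bits : List Char := g.flatMap (fun row => row.map (fun col => if col = "#" then '1' else '0'))
  if bits = [] then 0
  else bits.reverse.foldl (fun acc c => 2 * acc + (if c = '1' then (1 : Int) else 0)) 0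

-- ===== PRECONDITION & SPEC =====
def Spec_bio (g : List (List String)) (out : Int) : Prop := out = bio_alt g
instance (g : List (List String)) (out : Int) : Decidable (Spec_bio g out) := by unfold Spec_bio; infer_instance

-- ===== CLAIM (what is proved, stated in full; the proofs are below) =====
def Claim_equal_bio : Prop := ∀ (g : List (List String)), Dom_bio g → Spec_bio g (bio g)

-- ===== LEMMAS AND PROOFS =====
-- value of a cell list as a little-endian binary number
def pvVal (cs : List String) : Int :=
  cs.foldr (fun c a => 2 * a + (if c = "#" then 1 else 0)) 0

theorem pvVal_append (r s : List String) :
    pvVal (r ++ s) = pvVal r + 2 ^ r.length * pvVal s := by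
  induction r with
  | nil => simp [pvVal]
  | cons c r ih => simp [pvVal, List.foldr_cons] at ih ⊢; rw [ih]; ring

theorem pvA_fold (cs : List String) (n : Nat) (t : Int) :
    cs.foldl (fun (st : Nat × Int) col =>
      (st.1 + 1, if col = "#" then st.2 + 2 ^ st.1 else st.2)) (n, t)
    = (n + cs.length, t + 2 ^ n * pvVal cs) := by
  induction cs generalizing n t with
  | nil => simp [pvVal]
  | cons c cs ih =>
    simp only [List.foldl_cons, ih, pvVal, List.foldr_cons, Prod.mk.injEq]
    refine ⟨by simp; omega, ?_⟩
    split_ifs <;> ring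

theorem pvA_nested (g : List (List String)) (n : Nat) (t : Int) :
    g.foldl (fun (st : Nat × Int) row =>
      row.foldl (fun (st : Nat × Int) col =>
        (st.1 + 1, if col = "#" then st.2 + 2 ^ st.1 else st.2)) st) (n, t)
    = (n + (g.flatMap id).length, t + 2 ^ n * pvVal (g.flatMap id)) := by
  induction g generalizing n t with
  | nil => simp [pvVal]
  | cons r g ih =>
    simp only [List.foldl_cons, pvA_fold, ih, List.flatMap_cons, id, Prod.mk.injEq]
    refine ⟨by simp; omega, ?_⟩
    rw [pvVal_append, pow_add]
    ring

theorem pvVal_bits (cs : List String) :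
    (cs.map (fun col => if col = "#" then '1' else '0')).foldr
      (fun c a => 2 * a + (if c = '1' then (1 : Int) else 0)) 0 = pvVal cs := by
  induction cs with
  | nil => simp [pvVal]
  | cons c cs ih =>
    simp only [List.map_cons, List.foldr_cons, ih, pvVal, List.foldr_cons]
    split_ifs <;> simp_all

theorem pvBits_map (g : List (List String)) :
    g.flatMap (fun row => row.map (fun col => if col = "#" then '1' else '0'))
    = (g.flatMap id).map (fun col => if col = "#" then '1' else '0') := by
  induction g with
  | nil => simp
  | cons r g ih => simp only [List.flatMap_cons, id, List.map_append, ih]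

-- ===== VERDICT (by name: the statement is the Claim_ definition above) =====
theorem bio_spec : Claim_equal_bio := by
  intro g _
  show bio g = bio_alt g
  unfold bio bio_alt
  rw [pvA_nested]
  simp only [List.foldl_reverse, pvBits_map]
  split_ifs with h
  · have he : g.flatMap id = [] := List.map_eq_nil_iff.mp h
    simp [he, pvVal]
  · rw [pvVal_bits]; simp
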